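-- pv_equiv track=rewrite | github.com/asdoper0630/rosalind | grph/grph.py | presuf_list
-- ===== SOURCE A (Python) =====
-- def presuf_list(ISlist):
--     result_list = []
--     for i in ISlist:
--         for j in ISlist:
--             if i[1][-3:] == j[1][:3]:
--                 if i!=j: result_list.append(i[0]+' '+j[0])
--                 else: pass
--     return result_list
-- ===== SOURCE B (Python) =====
-- def presuf_list(ISlist):
--     by_prefix = {}
--     for k, j in ((j[1][:3], j) for j in ISlist):
--         by_prefix.setdefault(k, []).append(j)
--     result_list = []
--     for i in ISlist:
--         for j in by_prefix.get(i[1][-3:], []):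
--             if i != j:
--                 result_list.append(i[0] + ' ' + j[0])
--     return result_list
-- ===== Notes on version B (the rewrite author's own statement) =====
-- stated objective: faster
-- what changed: B indexes the nodes once by 3-char prefix in a dict and, per node, scans only the bucket matching its 3-char suffix, instead of A's nested scan over all pairs.
import Mathlib
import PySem

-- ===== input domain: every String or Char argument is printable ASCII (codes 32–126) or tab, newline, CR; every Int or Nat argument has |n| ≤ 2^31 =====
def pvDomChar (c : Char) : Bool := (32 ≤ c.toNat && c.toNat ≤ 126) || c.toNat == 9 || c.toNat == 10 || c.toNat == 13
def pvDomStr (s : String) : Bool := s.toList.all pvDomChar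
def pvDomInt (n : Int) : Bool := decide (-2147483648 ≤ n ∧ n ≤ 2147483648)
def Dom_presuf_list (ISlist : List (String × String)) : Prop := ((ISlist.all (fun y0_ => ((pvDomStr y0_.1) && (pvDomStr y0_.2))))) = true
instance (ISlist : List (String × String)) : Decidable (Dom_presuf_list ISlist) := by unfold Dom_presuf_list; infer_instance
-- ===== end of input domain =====

-- ===== PORT A =====
-- B builds a prefix index once and looks each suffix up; A scans all pairs. Objective: faster (asymptotic).
-- shared helpers: the 3-char prefix s[:3] and suffix s[-3:] (Python slices)
def pvPfx (s : String) : String := PySem.Str.slice s none (some 3)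
def pvSfx (s : String) : String := PySem.Str.slice s (some (-3)) none

def presuf_list (ISlist : List (String × String)) : List String :=
  ISlist.foldl (fun acc i =>
    ISlist.foldl (fun acc j =>
      if pvSfx i.2 == pvPfx j.2 then
        (if i ≠ j then acc ++ [i.1 ++ " " ++ j.1] else acc)
      else acc) acc) []

-- ===== PORT B =====
-- the prefix index: dict from 3-char prefix to the list of nodes with that prefix (Source B's by_prefix)
def pvIndex (ISlist : List (String × String)) : PySem.Dict String (List (String × String)) :=
  (ISlist.map (fun j => (pvPfx j.2, j))).foldl
    (fun d p => d.modify p.1 [] (· ++ [p.2])) PySem.Dict.empty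

def presuf_list_alt (ISlist : List (String × String)) : List String :=
  ISlist.foldl (fun acc i =>
    ((pvIndex ISlist).getD (pvSfx i.2) []).foldl (fun acc j =>
      if i ≠ j then acc ++ [i.1 ++ " " ++ j.1] else acc) acc) []

-- ===== PRECONDITION & SPEC =====
def Spec_presuf_list (ISlist : List (String × String)) (out : List String) : Prop := out = presuf_list_alt ISlist
instance (ISlist : List (String × String)) (out : List String) : Decidable (Spec_presuf_list ISlist out) := by unfold Spec_presuf_list; infer_instance

-- ===== CLAIM (what is proved, stated in full; the proofs are below) =====
def Claim_equal_presuf_list : Prop := ∀ (ISlist : List (String × String)), Dom_presuf_list ISlist → Spec_presuf_list ISlist (presuf_list ISlist)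

-- ===== LEMMAS AND PROOFS =====

-- the bucket stored under key k is exactly the sublist of nodes whose 3-char prefix is k
theorem pvBucket_eq (ISlist : List (String × String)) (k : String) :
    (pvIndex ISlist).getD k [] = ISlist.filter (fun j => pvPfx j.2 == k) := by
  unfold pvIndex
  rw [PySem.Dict.getD_foldl_modify_append]
  simp [List.filter_map, Function.comp_def]

-- folding the guarded append over the whole list equals folding the plain append over the filtered list
theorem pvInner_eq (l : List (String × String)) (i : String × String) (q : (String × String) → Bool)
    (acc : List String) :
    l.foldl (fun acc j => if q j then (if i ≠ j then acc ++ [i.1 ++ " " ++ j.1] else acc) else acc) acc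
    = (l.filter q).foldl (fun acc j => if i ≠ j then acc ++ [i.1 ++ " " ++ j.1] else acc) acc := by
  induction l generalizing acc with
  | nil => rfl
  | cons x xs ih =>
    cases h : q x with
    | false =>
      rw [List.foldl_cons, if_neg (by simp [h]), List.filter_cons_of_neg (by simp [h])]
      exact ih _
    | true =>
      rw [List.foldl_cons, if_pos h, List.filter_cons_of_pos h, List.foldl_cons]
      exact ih _

-- ===== VERDICT (by name: the statement is the Claim_ definition above) =====
theorem presuf_list_spec : Claim_equal_presuf_list := by
  intro ISlist _
  unfold Spec_presuf_list presuf_list presuf_list_alt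
  have h : (fun (acc : List String) (i : String × String) =>
      ((pvIndex ISlist).getD (pvSfx i.2) []).foldl
        (fun acc j => if i ≠ j then acc ++ [i.1 ++ " " ++ j.1] else acc) acc)
      = (fun (acc : List String) (i : String × String) =>
      ISlist.foldl (fun acc j =>
        if pvSfx i.2 == pvPfx j.2 then (if i ≠ j then acc ++ [i.1 ++ " " ++ j.1] else acc)
        else acc) acc) := by
    funext acc i
    rw [pvBucket_eq, pvInner_eq]
    have hq : (fun j => pvPfx j.2 == pvSfx i.2) = (fun (j : String × String) => pvSfx i.2 == pvPfx j.2) := by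
      funext j; exact BEq.comm
    rw [hq]
  rw [h]
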